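-- pv_equiv track=rewrite | github.com/apprenti-org/curriculum-tracking | scripts/generate-knowledge-base.py | extract_outline_body
-- ===== SOURCE A (Python) =====
-- def extract_outline_body(content):
--     """Extract the module/lesson content from an outline, skipping the metadata header."""
--     lines = content.split('\n')
--     body_lines = []
--     in_body = False
--
--     for line in lines:
--         # Start capturing at first ## Module or ## heading that isn't metadata
--         if not in_body:
--             if line.startswith('## '):
--                 header_text = line[3:].strip().lower()
--                 skip_headers = {'course information', 'course description', 'course learning outcomes',
--                                'learning outcomes', 'prerequisites', 'software required'}
--                 if not any(header_text.startswith(s) for s in skip_headers):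
--                     in_body = True
--                     body_lines.append(line)
--             elif line.startswith('---') and body_lines:
--                 # horizontal rule before modules — skip it
--                 continue
--         else:
--             body_lines.append(line)
--
--     return '\n'.join(body_lines).strip()
-- ===== SOURCE B (Python) =====
-- def _is_body_start(line):
--     """A line opens the body iff it is a '## ' heading whose text matches no metadata header."""
--     if not line.startswith('## '):
--         return False
--     header = line[3:].strip().lower()
--     return all(not header.startswith(s) for s in
--                ('course information', 'course description', 'course learning outcomes',
--                 'learning outcomes', 'prerequisites', 'software required'))
--
--
-- def extract_outline_body(content):
--     """Extract the module/lesson content from an outline, skipping the metadata header."""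
--     lines = content.split('\n')
--     while lines and not _is_body_start(lines[0]):
--         lines.pop(0)
--     return '\n'.join(lines).strip()
-- ===== Notes on version B (the rewrite author's own statement) =====
-- stated objective: simpler
-- what changed: B replaces A's stateful accumulator loop (in_body flag, body_lines list, dead '---' branch) by a named predicate _is_body_start and a drop-while pass that discards leading lines until the first non-metadata '## ' heading, returning the joined remaining tail.
import Mathlib
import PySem

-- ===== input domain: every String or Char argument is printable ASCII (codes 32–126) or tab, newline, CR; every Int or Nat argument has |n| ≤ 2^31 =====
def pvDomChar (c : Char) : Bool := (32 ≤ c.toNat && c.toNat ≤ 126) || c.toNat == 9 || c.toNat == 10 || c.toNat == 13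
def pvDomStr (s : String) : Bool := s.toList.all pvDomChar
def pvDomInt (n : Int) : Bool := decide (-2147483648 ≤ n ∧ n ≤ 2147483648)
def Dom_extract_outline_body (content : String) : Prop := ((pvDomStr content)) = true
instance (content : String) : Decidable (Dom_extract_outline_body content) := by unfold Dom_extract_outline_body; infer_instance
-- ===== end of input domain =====

-- B replaces A's stateful accumulate loop (in_body flag + dead '---' branch) by a named
-- body-start predicate and a drop-while pass over the leading lines; objective: simpler.

-- ===== PORT A =====
def pvASkipHeaders : List String :=
  ["course information", "course description", "course learning outcomes",
   "learning outcomes", "prerequisites", "software required"]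

-- A's loop: state (body_lines, in_body), branches in source order.
def pvALoop : List String → List String → Bool → List String
  | [], bodyLines, _ => bodyLines
  | line :: rest, bodyLines, inBody =>
    if inBody = false then
      if PySem.Str.startswith line "## " then
        -- header_text = line[3:].strip().lower(), inlined into its one use
        if !(pvASkipHeaders.any (fun s => PySem.Str.startswith
              (PySem.Str.lower (PySem.Str.strip (PySem.Str.slice line (some 3) none))) s)) then
          pvALoop rest (bodyLines ++ [line]) true
        else
          pvALoop rest bodyLines inBody
      else if PySem.Str.startswith line "---" && !bodyLines.isEmpty then
        pvALoop rest bodyLines inBody  -- continue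
      else
        pvALoop rest bodyLines inBody
    else
      pvALoop rest (bodyLines ++ [line]) inBody

def extract_outline_body (content : String) : String :=
  PySem.Str.strip (PySem.Str.join "\n" (pvALoop ((PySem.Str.split? content "\n").getD []) [] false))

-- ===== PORT B =====
-- _is_body_start: a '## ' heading whose text matches no metadata header.
def pvIsBodyStart (line : String) : Bool :=
  if !PySem.Str.startswith line "## " then false
  else
    let header := PySem.Str.lower (PySem.Str.strip (PySem.Str.slice line (some 3) none))
    (["course information", "course description", "course learning outcomes",
      "learning outcomes", "prerequisites", "software required"] : List String).all
      (fun s => !PySem.Str.startswith header s)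

-- the while-pop loop: drop leading lines while they do not start the body
def pvDropMeta : List String → List String
  | [] => []
  | l :: ls => if !pvIsBodyStart l then pvDropMeta ls else l :: ls

def extract_outline_body_alt (content : String) : String :=
  PySem.Str.strip (PySem.Str.join "\n" (pvDropMeta ((PySem.Str.split? content "\n").getD [])))

-- ===== PRECONDITION & SPEC =====
def Spec_extract_outline_body (content : String) (out : String) : Prop := out = extract_outline_body_alt content
instance (content : String) (out : String) : Decidable (Spec_extract_outline_body content out) := by unfold Spec_extract_outline_body; infer_instance

-- ===== CLAIM (what is proved, stated in full; the proofs are below) =====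
def Claim_equal_extract_outline_body : Prop := ∀ (content : String), Dom_extract_outline_body content → Spec_extract_outline_body content (extract_outline_body content)

-- ===== LEMMAS AND PROOFS =====

-- Once in_body, A appends every remaining line.
theorem pvALoop_true (ls : List String) : ∀ acc, pvALoop ls acc true = acc ++ ls := by
  induction ls with
  | nil => intro acc; simp [pvALoop]
  | cons l rest ih => intro acc; simp [pvALoop, ih]

theorem pvNotAnyEqAllNot {α : Type} (l : List α) (f : α → Bool) :
    (!l.any f) = l.all (fun x => !f x) := by
  induction l with
  | nil => rfl
  | cons a t ih => simp [List.any, List.all, ← ih]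

-- B's predicate is A's guard pair: a '## ' line whose header matches no skip header.
theorem pvIsBodyStart_eq (l : String) :
    pvIsBodyStart l = (PySem.Str.startswith l "## " &&
      !(pvASkipHeaders.any (fun s => PySem.Str.startswith
          (PySem.Str.lower (PySem.Str.strip (PySem.Str.slice l (some 3) none))) s))) := by
  unfold pvIsBodyStart pvASkipHeaders
  by_cases h : PySem.Str.startswith l "## " <;>
    simp only [h, Bool.not_true, Bool.not_false, if_true, Bool.true_and,
      Bool.false_and, pvNotAnyEqAllNot]; simp

-- Before the body starts, A's accumulator stays empty until the first line satisfying
-- pvIsBodyStart, from which A keeps everything — exactly B's drop-while pass.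
theorem pvALoop_false (ls : List String) :
    pvALoop ls [] false = pvDropMeta ls := by
  induction ls with
  | nil => simp [pvALoop, pvDropMeta]
  | cons l rest ih =>
    rw [pvALoop, pvDropMeta, pvIsBodyStart_eq]
    by_cases hs : PySem.Str.startswith l "## "
    · by_cases hc : pvASkipHeaders.any (fun s => PySem.Str.startswith
          (PySem.Str.lower (PySem.Str.strip (PySem.Str.slice l (some 3) none))) s)
      · rw [hs, hc]; simpa using ih
      · rw [hs, Bool.eq_false_iff.mpr hc]; simp [pvALoop_true]
    · rw [Bool.eq_false_iff.mpr hs]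
      by_cases hd : PySem.Str.startswith l "---" <;> simpa [hd] using ih

-- ===== VERDICT (by name: the statement is the Claim_ definition above) =====
theorem extract_outline_body_spec : Claim_equal_extract_outline_body := by
  intro content _
  show extract_outline_body content = extract_outline_body_alt content
  unfold extract_outline_body extract_outline_body_alt
  rw [pvALoop_false]
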